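-- pv_equiv track=rewrite | github.com/james4388/algorithm-1 | algorithms/google/MaxChunkToSort.py | maxChunksToSortedII
-- ===== SOURCE A (Python) =====
-- def maxChunksToSortedII(arr):
--     n = len(arr)
--     right = [0 for i in range(n)]
--     _min = arr[-1]
--     for i in range(n-1, -1, -1):
--         _min = min(arr[i], _min)
--         right[i] = _min
--
--     _max = arr[0]
--     ans = 0
--     for idx, val in enumerate(arr):
--         _max = max(_max, val)
--         if idx == n - 1 or _max <= right[idx+1]:
--             ans += 1
--     return ans
-- ===== SOURCE B (Python) =====
-- def maxChunksToSortedII(arr):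
--     n = len(arr)
--     return sum(1 for i in range(n)
--                if i == n - 1 or max(arr[:i + 1]) <= min(arr[i + 1:]))
-- ===== Notes on version B (the rewrite author's own statement) =====
-- stated objective: simpler
-- what changed: Replaced A's two passes with precomputed suffix-min array and running prefix max by a direct one-liner that counts cut positions i where max(arr[:i+1]) <= min(arr[i+1:]) computed straight from slices (no auxiliary array, no running state).
import Mathlib
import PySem

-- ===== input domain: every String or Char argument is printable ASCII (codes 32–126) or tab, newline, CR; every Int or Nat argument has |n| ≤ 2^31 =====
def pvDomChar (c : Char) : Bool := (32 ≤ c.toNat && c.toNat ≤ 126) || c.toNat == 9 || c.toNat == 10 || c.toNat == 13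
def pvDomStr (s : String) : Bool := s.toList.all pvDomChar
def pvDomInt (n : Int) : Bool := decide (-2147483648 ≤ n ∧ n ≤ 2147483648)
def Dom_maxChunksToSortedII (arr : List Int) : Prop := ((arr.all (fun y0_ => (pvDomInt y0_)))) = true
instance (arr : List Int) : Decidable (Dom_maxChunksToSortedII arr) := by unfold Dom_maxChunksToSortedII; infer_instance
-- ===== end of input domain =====

-- B replaces A's suffix-min array + running prefix-max passes by a direct count of cut
-- positions via list slices; simpler (shorter), not faster (O(n^2) vs O(n)).


-- ===== PORT A =====
-- first loop body: _min = min(arr[i], _min); right[i] = _min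
def pvA_loop1 (arr : List Int) (st : Int × List Int) (i : Int) : Int × List Int :=
  let m := min (PySem.List.pyGetD arr i 0) st.1
  (m, PySem.List.pySetD st.2 i m)

-- right = [0]*n; _min initialised from arr's LAST element; countdown loop over range(n-1,-1,-1)
-- (that initial read raises IndexError on the empty list, excluded by Pre_; all loop accesses are in range)
def pvA_right (arr : List Int) : List Int :=
  ((PySem.List.pyRange (PySem.List.len arr - 1) (-1) (-1)).foldl (pvA_loop1 arr)
    (PySem.List.pyGetD arr (-1) 0,
     (PySem.List.pyRange 0 (PySem.List.len arr) 1).map (fun _ => (0 : Int)))).2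

-- second loop body: _max = max(_max, val); if idx == n-1 or _max <= right[idx+1]: ans += 1
def pvA_loop2 (arr : List Int) (right : List Int) (st : Int × Int) (iv : Int × Int) : Int × Int :=
  let mx := max st.1 iv.2
  (mx, if iv.1 == PySem.List.len arr - 1 then st.2 + 1
       else if mx ≤ PySem.List.pyGetD right (iv.1 + 1) 0 then st.2 + 1 else st.2)

def maxChunksToSortedII (arr : List Int) : Int :=
  ((PySem.List.enumerate arr).foldl (pvA_loop2 arr (pvA_right arr))
    (PySem.List.pyGetD arr 0 0, 0)).2

-- ===== PORT B =====
-- sum(1 for i in range(n) if i == n-1 or max(prefix through i) <= min(rest)), via slices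
def maxChunksToSortedII_alt (arr : List Int) : Int :=
  (((PySem.List.pyRange 0 (PySem.List.len arr) 1).countP (fun i =>
      i == PySem.List.len arr - 1 ||
      decide ((PySem.List.max? (PySem.List.slice arr none (some (i + 1))) (fun x => x)).getD 0
            ≤ (PySem.List.min? (PySem.List.slice arr (some (i + 1)) none) (fun x => x)).getD 0)) : Nat) : Int)

-- ===== PRECONDITION & SPEC =====
-- A first reads the last element of arr, so it raises IndexError on the empty list; on every other input it returns.
def Pre_maxChunksToSortedII (arr : List Int) : Prop := arr ≠ []
instance (arr : List Int) : Decidable (Pre_maxChunksToSortedII arr) := by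
  unfold Pre_maxChunksToSortedII; infer_instance
def pvWitness_maxChunksToSortedII : List Int := [2, 1, 3]

def Spec_maxChunksToSortedII (arr : List Int) (out : Int) : Prop := out = maxChunksToSortedII_alt arr
instance (arr : List Int) (out : Int) : Decidable (Spec_maxChunksToSortedII arr out) := by
  unfold Spec_maxChunksToSortedII; infer_instance

-- ===== CLAIM (what is proved, stated in full; the proofs are below) =====
def Claim_equal_maxChunksToSortedII : Prop := ∀ (arr : List Int), Dom_maxChunksToSortedII arr → Pre_maxChunksToSortedII arr → Spec_maxChunksToSortedII arr (maxChunksToSortedII arr)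

-- ===== LEMMAS AND PROOFS =====

-- max/min of a nonempty list, as the running fold both programs produce ([] -> 0)
def pvMax1 : List Int → Int
  | [] => 0
  | x :: t => t.foldl max x

def pvMin1 : List Int → Int
  | [] => 0
  | x :: t => t.foldl min x

-- the common cut condition and the common count
def pvCond (arr : List Int) (k : Nat) : Bool :=
  ((k : Int) == (arr.length : Int) - 1) ||
  decide (pvMax1 (arr.take (k + 1)) ≤ pvMin1 (arr.drop (k + 1)))

def pvCount (arr : List Int) : Int := ((List.range arr.length).countP (pvCond arr) : Nat)

theorem pvMax?_getD (l : List Int) : (PySem.List.max? l (fun x => x)).getD 0 = pvMax1 l := by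
  cases l with
  | nil =>
    rw [(PySem.List.max?_eq_none_iff _ _).mpr rfl]
    rfl
  | cons x t =>
    rw [PySem.List.max?_id_cons]
    rfl

theorem pvMin?_getD (l : List Int) : (PySem.List.min? l (fun x => x)).getD 0 = pvMin1 l := by
  cases l with
  | nil =>
    rw [(PySem.List.min?_eq_none_iff _ _).mpr rfl]
    rfl
  | cons x t =>
    rw [PySem.List.min?_id_cons]
    rfl

theorem pvB_eq (arr : List Int) : maxChunksToSortedII_alt arr = pvCount arr := by
  unfold maxChunksToSortedII_alt pvCount
  rw [PySem.List.len_eq, PySem.List.pyRange_zero_natCast, List.countP_map]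
  congr 1
  apply List.countP_congr
  intro k _
  have h1 : ((k : Int) + 1) = ((k + 1 : Nat) : Int) := by push_cast; ring
  simp only [Function.comp, h1, PySem.List.slice_to_natCast, PySem.List.slice_from_natCast,
    pvMax?_getD, pvMin?_getD, pvCond]

-- first component of A's first loop ignores the right array
theorem pvFold1_fst (arr : List Int) (L : List Int) : ∀ (st : Int × List Int),
    (L.foldl (pvA_loop1 arr) st).1
      = L.foldl (fun m i => min (PySem.List.pyGetD arr i 0) m) st.1 := by
  induction L with
  | nil => intro st; rfl
  | cons x t ih => intro st; simp only [List.foldl_cons, ih, pvA_loop1]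

-- A's first loop preserves the length of the right array
theorem pvFold1_len (arr : List Int) (L : List Int) : ∀ (st : Int × List Int),
    ((L.foldl (pvA_loop1 arr) st).2).length = st.2.length := by
  induction L with
  | nil => intro st; rfl
  | cons x t ih =>
    intro st
    simp only [List.foldl_cons, ih, pvA_loop1, PySem.List.length_pySetD]

-- writes at indices ≠ k do not change the entry at k
theorem pvFold1_get_preserve (arr : List Int) (k : Nat) (L : List Int) :
    ∀ (st : Int × List Int), (∀ i ∈ L, 0 ≤ i ∧ i < (st.2.length : Int) ∧ i ≠ (k : Int)) →
    PySem.List.pyGetD ((L.foldl (pvA_loop1 arr) st).2) (k : Int) 0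
      = PySem.List.pyGetD st.2 (k : Int) 0 := by
  induction L with
  | nil => intro st _; rfl
  | cons x t ih =>
    intro st hmem
    obtain ⟨hx0, hxlen, hxk⟩ := hmem x (List.mem_cons_self)
    have hlen' : (pvA_loop1 arr st x).2.length = st.2.length := by
      simp [pvA_loop1, PySem.List.length_pySetD]
    rw [List.foldl_cons, ih _ (fun i hi => by
      obtain ⟨a, b, c⟩ := hmem i (List.mem_cons_of_mem _ hi)
      exact ⟨a, by rw [hlen']; exact b, c⟩)]
    have hxt : x = ((x.toNat : Nat) : Int) := (Int.toNat_of_nonneg hx0).symm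
    have hxlt : x.toNat < st.2.length := by omega
    show PySem.List.pyGetD (PySem.List.pySetD st.2 x _) (k : Int) 0 = _
    rw [hxt, PySem.List.pyGetD_pySetD_natCast _ _ _ _ _ hxlt, if_neg (by omega)]

-- pulling the first min out of a fold
theorem pvMinPull (g : Int → Int) (L : List Int) : ∀ (a b : Int),
    L.foldl (fun m i => min (g i) m) (min a b)
      = min a (L.foldl (fun m i => min (g i) m) b) := by
  induction L with
  | nil => intro a b; rfl
  | cons x t ih =>
    intro a b
    simp only [List.foldl_cons]
    rw [show min (g x) (min a b) = min a (min (g x) b) from by rw [min_left_comm], ih]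

-- a min-fold is insensitive to reversal
theorem pvMinReverse (g : Int → Int) (L : List Int) : ∀ (b : Int),
    L.reverse.foldl (fun m i => min (g i) m) b = L.foldl (fun m i => min (g i) m) b := by
  induction L with
  | nil => intro b; rfl
  | cons x t ih =>
    intro b
    rw [List.reverse_cons, List.foldl_append, List.foldl_cons, ih, List.foldl_cons,
      List.foldl_nil, pvMinPull]

theorem pvMinFoldInit_le (t : List Int) : ∀ (b : Int), t.foldl min b ≤ b := by
  induction t with
  | nil => intro b; exact le_refl b
  | cons y t ih =>
    intro b
    exact le_trans (ih (min b y)) (min_le_left _ _)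

theorem pvMinFold_le_mem (t : List Int) : ∀ (x a : Int), a ∈ t → t.foldl min x ≤ a := by
  induction t with
  | nil => intro x a ha; cases ha
  | cons y t ih =>
    intro x a ha
    rcases List.mem_cons.mp ha with h | h
    · subst h
      exact le_trans (pvMinFoldInit_le t (min x a)) (min_le_right _ _)
    · exact ih (min x y) a h

-- folding (fun m v => min v m) over a cons, with the flip rewritten away
theorem pvMinPull2 (t : List Int) : ∀ (a x : Int),
    t.foldl min (min a x) = min a (t.foldl min x) := by
  induction t with
  | nil => intro a x; rfl
  | cons y t ih =>
    intro a x
    simp only [List.foldl_cons]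
    rw [min_assoc a x y, ih]

theorem pvFoldFlip (x : Int) (t : List Int) (a : Int) :
    (x :: t).foldl (fun m v => min v m) a = min a (t.foldl min x) := by
  have hf : (fun (m v : Int) => min v m) = (fun (m v : Int) => min m v) := by
    funext m v; exact min_comm _ _
  rw [hf, List.foldl_cons, pvMinPull2]

theorem pvMax1_snoc (x : Int) (t : List Int) (a : Int) :
    pvMax1 ((x :: t) ++ [a]) = max (pvMax1 (x :: t)) a := by
  simp [pvMax1, List.foldl_append]

-- A's right array holds the suffix minima
theorem pvR_eq (arr : List Int) (h : arr ≠ []) (k : Nat) (hk : k < arr.length) :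
    PySem.List.pyGetD (pvA_right arr) (k : Int) 0 = pvMin1 (arr.drop k) := by
  unfold pvA_right
  rw [PySem.List.len_eq]
  have hC : PySem.List.pyRange ((arr.length : Int) - 1) (-1) (-1)
      = ((PySem.List.pyRange (k : Int) (arr.length : Int)).reverse
          ++ (PySem.List.pyRange 0 (k : Int)).reverse) := by
    have h0 : PySem.List.pyRange ((arr.length : Int) - 1) (-1) (-1)
        = (PySem.List.pyRange 0 (arr.length : Int)).reverse := by
      rw [PySem.List.pyRange_neg_one_eq_reverse]
      norm_num
    rw [h0, PySem.List.pyRange_one_append 0 (k : Int) (arr.length : Int) (by positivity)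
      (by exact_mod_cast hk.le), List.reverse_append]
  rw [hC, List.foldl_append]
  -- phase 1: indices n-1 … k; the last step writes position k
  have hcons : PySem.List.pyRange (k : Int) (arr.length : Int)
      = (k : Int) :: PySem.List.pyRange ((k : Int) + 1) (arr.length : Int) :=
    PySem.List.pyRange_one_cons (by exact_mod_cast hk)
  set init : Int × List Int :=
    (PySem.List.pyGetD arr (-1) 0,
      (PySem.List.pyRange 0 (arr.length : Int)).map (fun _ => (0 : Int))) with hinit
  set st' := ((PySem.List.pyRange ((k : Int) + 1) (arr.length : Int)).reverse).foldl
      (pvA_loop1 arr) init with hst'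
  have hphase1 : ((PySem.List.pyRange (k : Int) (arr.length : Int)).reverse).foldl
      (pvA_loop1 arr) init = pvA_loop1 arr st' (k : Int) := by
    rw [hcons, List.reverse_cons, List.foldl_append, List.foldl_cons, List.foldl_nil]
  -- the running minimum entering the write at k
  have hm' : st'.1 = (PySem.List.pyRange ((k : Int) + 1) (arr.length : Int)).foldl
      (fun m i => min (PySem.List.pyGetD arr i 0) m) init.1 := by
    rw [hst', pvFold1_fst, pvMinReverse]
  have hm1 : min (PySem.List.pyGetD arr (k : Int) 0) st'.1 = pvMin1 (arr.drop k) := by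
    rw [hm']
    rw [show min (PySem.List.pyGetD arr (k : Int) 0)
          ((PySem.List.pyRange ((k : Int) + 1) (arr.length : Int)).foldl
            (fun m i => min (PySem.List.pyGetD arr i 0) m) init.1)
        = (PySem.List.pyRange (k : Int) (arr.length : Int)).foldl
            (fun m i => min (PySem.List.pyGetD arr i 0) m) init.1 from ?_]
    · have := PySem.List.foldl_pyRange_pyGetD arr 0 (fun acc v => min v acc) init.1
        (a := (k : Int)) (by positivity)
      rw [PySem.List.len_eq] at this
      rw [this, Int.toNat_natCast]
      have hne : arr.drop k ≠ [] := by
        intro hnil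
        have := congrArg List.length hnil
        simp at this
        omega
      cases hd : arr.drop k with
      | nil => exact absurd hd hne
      | cons x t =>
        rw [pvFoldFlip]
        have hlast : init.1 ∈ x :: t := by
          rw [hinit]
          show PySem.List.pyGetD arr (-1) 0 ∈ x :: t
          rw [PySem.List.pyGetD_neg_one arr 0 h, ← hd,
            show arr.getLast h = (arr.drop k).getLast (by rw [hd]; simp) from
              (List.getLast_drop _).symm]
          exact List.getLast_mem _
        have hle : t.foldl min x ≤ init.1 := by
          rcases List.mem_cons.mp hlast with h1 | h1
          · rw [h1]; exact pvMinFoldInit_le t x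
          · exact pvMinFold_le_mem t x _ h1
        show min init.1 (t.foldl min x) = pvMin1 (x :: t)
        rw [min_eq_right hle]
        rfl
    · rw [hcons, List.foldl_cons, pvMinPull]
  -- lengths
  have hlen0 : init.2.length = arr.length := by
    rw [hinit]
    simp [PySem.List.length_pyRange_one]
  have hlenst' : st'.2.length = arr.length := by
    rw [hst', pvFold1_len, hlen0]
  have hget1 : PySem.List.pyGetD (pvA_loop1 arr st' (k : Int)).2 (k : Int) 0
      = pvMin1 (arr.drop k) := by
    show PySem.List.pyGetD (PySem.List.pySetD st'.2 (k : Int) _) (k : Int) 0 = _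
    rw [PySem.List.pyGetD_pySetD_natCast _ _ _ _ _ (by omega : k < st'.2.length),
      if_pos rfl]
    exact hm1
  -- phase 2: indices k-1 … 0 never touch position k
  rw [hphase1, pvFold1_get_preserve arr k _ _ (fun i hi => by
    rw [List.mem_reverse, PySem.List.mem_pyRange_one] at hi
    have hl : (pvA_loop1 arr st' (k : Int)).2.length = arr.length := by
      simp [pvA_loop1, hlenst']
    refine ⟨hi.1, ?_, by omega⟩
    rw [hl]
    omega)]
  exact hget1

-- A's second loop: running maximum of the prefix, and the running count
theorem pvLoop2 (arr : List Int) (h : arr ≠ []) : ∀ (m : Nat), m ≤ arr.length →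
    ((PySem.List.pyRange 0 (m : Int)).map (fun j => (j, PySem.List.pyGetD arr j 0))).foldl
        (pvA_loop2 arr (pvA_right arr)) (PySem.List.pyGetD arr 0 0, 0)
      = (pvMax1 (arr.take (max m 1)), (((List.range m).countP (pvCond arr) : Nat) : Int)) := by
  intro m
  induction m with
  | zero =>
    intro _
    rw [show ((0 : Nat) : Int) = 0 from rfl, PySem.List.pyRange_one_eq_nil (le_refl 0)]
    cases arr with
    | nil => exact absurd rfl h
    | cons x t =>
      simp [PySem.List.pyGetD_zero_cons, pvMax1]
  | succ m ih =>
    intro hm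
    have hmlt : m < arr.length := by omega
    rw [show ((m + 1 : Nat) : Int) = (m : Int) + 1 from by push_cast; ring,
      PySem.List.pyRange_one_succ_right (by positivity), List.map_append, List.foldl_append,
      ih (by omega), List.map_cons, List.map_nil, List.foldl_cons, List.foldl_nil]
    have hgetm : PySem.List.pyGetD arr (m : Int) 0 = arr[m] :=
      PySem.List.pyGetD_ofNat arr m 0 hmlt
    have hmx : max (pvMax1 (arr.take (max m 1))) arr[m] = pvMax1 (arr.take (m + 1)) := by
      cases m with
      | zero =>
        cases arr with
        | nil => exact absurd rfl h
        | cons x t => simp [pvMax1]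
      | succ m' =>
        rw [show max (m' + 1) 1 = m' + 1 from by omega,
          show arr.take (m' + 1 + 1) = arr.take (m' + 1) ++ [arr[m' + 1]] from by
            rw [List.take_add_one, List.getElem?_eq_getElem hmlt]; rfl]
        have hne : arr.take (m' + 1) ≠ [] := by
          have hlt : (arr.take (m' + 1)).length = m' + 1 := by
            rw [List.length_take]; omega
          intro hnil
          rw [hnil] at hlt
          simp at hlt
        cases hd : arr.take (m' + 1) with
        | nil => exact absurd hd hne
        | cons x t =>
          rw [pvMax1_snoc]
    have hcount : (List.range (m + 1)).countP (pvCond arr)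
        = (List.range m).countP (pvCond arr) + if pvCond arr m then 1 else 0 := by
      rw [List.range_succ, List.countP_append]
      simp [List.countP_cons]
    simp only [pvA_loop2, hgetm, hmx, PySem.List.len_eq]
    rw [show max (m + 1) 1 = m + 1 from by omega]
    refine Prod.ext rfl ?_
    show (if ((m : Int) == (arr.length : Int) - 1) = true then _ else _) = _
    rw [hcount]
    by_cases hlast : (m : Int) = (arr.length : Int) - 1
    · rw [if_pos (by exact beq_iff_eq.mpr hlast),
        show pvCond arr m = true from by
          simp only [pvCond]
          simp [hlast]]
      simp
    · have hm1lt : m + 1 < arr.length := by omega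
      rw [if_neg (by simp [beq_iff_eq, hlast]),
        show ((m : Int) + 1) = ((m + 1 : Nat) : Int) from by push_cast; ring,
        pvR_eq arr h (m + 1) hm1lt]
      have hcnd : pvCond arr m = decide (pvMax1 (arr.take (m + 1)) ≤ pvMin1 (arr.drop (m + 1))) := by
        simp only [pvCond]
        simp [hlast]
      rw [hcnd]
      by_cases hle : pvMax1 (arr.take (m + 1)) ≤ pvMin1 (arr.drop (m + 1))
      · rw [if_pos (by exact hle), if_pos (by exact decide_eq_true hle)]
        push_cast
        ring
      · rw [if_neg (by exact hle), if_neg (by simpa using hle)]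
        push_cast
        ring

theorem pvA_eq (arr : List Int) (h : arr ≠ []) : maxChunksToSortedII arr = pvCount arr := by
  unfold maxChunksToSortedII
  rw [PySem.List.enumerate_eq_map_pyRange arr 0, PySem.List.len_eq,
    pvLoop2 arr h arr.length (le_refl _)]
  rfl

-- ===== VERDICT (by name: the statement is the Claim_ definition above) =====
theorem maxChunksToSortedII_spec : Claim_equal_maxChunksToSortedII := by
  intro arr _ hpre
  unfold Spec_maxChunksToSortedII
  rw [pvA_eq arr hpre, pvB_eq arr]
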